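-- pv_equiv track=rewrite | github.com/Hasanpercin/Engine | app/calculators/natal.py | calculate_elements_modalities
-- ===== SOURCE A (Python) =====
-- from typing import Dict, Any, List, Optional
--
-- def calculate_elements_modalities(planets: Dict[str, Any]) -> Dict[str, Any]:
--     """Calculate element and modality distribution"""
--     elements = {'fire': 0, 'earth': 0, 'air': 0, 'water': 0}
--     modalities = {'cardinal': 0, 'fixed': 0, 'mutable': 0}
--
--     element_map = {
--         'Aries': 'fire', 'Taurus': 'earth', 'Gemini': 'air', 'Cancer': 'water',
--         'Leo': 'fire', 'Virgo': 'earth', 'Libra': 'air', 'Scorpio': 'water',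
--         'Sagittarius': 'fire', 'Capricorn': 'earth', 'Aquarius': 'air', 'Pisces': 'water'
--     }
--
--     modality_map = {
--         'Aries': 'cardinal', 'Taurus': 'fixed', 'Gemini': 'mutable', 'Cancer': 'cardinal',
--         'Leo': 'fixed', 'Virgo': 'mutable', 'Libra': 'cardinal', 'Scorpio': 'fixed',
--         'Sagittarius': 'mutable', 'Capricorn': 'cardinal', 'Aquarius': 'fixed', 'Pisces': 'mutable'
--     }
--
--     for planet_name, planet_data in planets.items():
--         if planet_name == 'north_node':
--             continue
--
--         sign = planet_data.get('sign')
--         if sign: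
--             elements[element_map.get(sign, 'air')] += 1
--             modalities[modality_map.get(sign, 'mutable')] += 1
--
--     return {'elements': elements, 'modalities': modalities}
-- ===== SOURCE B (Python) =====
-- def calculate_elements_modalities(planets):
--     """Calculate element and modality distribution"""
--     FIRE = {'Aries', 'Leo', 'Sagittarius'}
--     EARTH = {'Taurus', 'Virgo', 'Capricorn'}
--     WATER = {'Cancer', 'Scorpio', 'Pisces'}
--     CARDINAL = {'Aries', 'Cancer', 'Libra', 'Capricorn'}
--     FIXED = {'Taurus', 'Leo', 'Scorpio', 'Aquarius'}
--
--     signs = [pd.get('sign') for name, pd in planets.items()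
--              if name != 'north_node' and pd.get('sign')]
--
--     elements = {
--         'fire': sum(s in FIRE for s in signs),
--         'earth': sum(s in EARTH for s in signs),
--         'air': sum(s not in FIRE and s not in EARTH and s not in WATER for s in signs),
--         'water': sum(s in WATER for s in signs),
--     }
--     modalities = {
--         'cardinal': sum(s in CARDINAL for s in signs),
--         'fixed': sum(s in FIXED for s in signs),
--         'mutable': sum(s not in CARDINAL and s not in FIXED for s in signs),
--     }
--     return {'elements': elements, 'modalities': modalities}
-- ===== Notes on version B (the rewrite author's own statement) =====
-- stated objective: alternative
-- what changed: B replaces A's mutable-dict increment loop by a declarative pipeline: it first extracts the list of counted signs, then builds each of the seven tallies directly as a membership-count (sum of 's in SET') against fixed per-bucket sign sets, with the air/mutable buckets counted as non-membership in the named sets, so no counter dict is ever mutated.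
import Mathlib
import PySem

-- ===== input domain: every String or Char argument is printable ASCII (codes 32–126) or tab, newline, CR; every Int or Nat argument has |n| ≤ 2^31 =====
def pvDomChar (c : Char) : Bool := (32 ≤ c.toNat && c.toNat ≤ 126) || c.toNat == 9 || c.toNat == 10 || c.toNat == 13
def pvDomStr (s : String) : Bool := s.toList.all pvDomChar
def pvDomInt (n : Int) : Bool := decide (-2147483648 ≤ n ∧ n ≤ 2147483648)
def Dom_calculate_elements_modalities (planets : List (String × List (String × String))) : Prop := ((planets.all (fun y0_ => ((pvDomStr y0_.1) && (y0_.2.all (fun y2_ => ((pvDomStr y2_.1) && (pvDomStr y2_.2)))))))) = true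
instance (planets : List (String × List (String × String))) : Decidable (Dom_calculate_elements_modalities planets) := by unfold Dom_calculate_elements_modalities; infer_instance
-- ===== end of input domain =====

-- B replaces A's mutable-dict increment loop by extract-the-signs-then-count: each of the seven
-- tallies is a direct membership count against a fixed per-bucket sign set (alternative decomposition, same cost).


-- ===== PORT A =====
def elementMapA : PySem.Dict String String := PySem.Dict.ofList
  [("Aries","fire"), ("Taurus","earth"), ("Gemini","air"), ("Cancer","water"),
   ("Leo","fire"), ("Virgo","earth"), ("Libra","air"), ("Scorpio","water"),
   ("Sagittarius","fire"), ("Capricorn","earth"), ("Aquarius","air"), ("Pisces","water")]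

def modalityMapA : PySem.Dict String String := PySem.Dict.ofList
  [("Aries","cardinal"), ("Taurus","fixed"), ("Gemini","mutable"), ("Cancer","cardinal"),
   ("Leo","fixed"), ("Virgo","mutable"), ("Libra","cardinal"), ("Scorpio","fixed"),
   ("Sagittarius","mutable"), ("Capricorn","cardinal"), ("Aquarius","fixed"), ("Pisces","mutable")]

-- one iteration of A's loop body (skip conditions, then both `+= 1` updates)
def stepA (st : PySem.Dict String Int × PySem.Dict String Int)
    (p : String × List (String × String)) : PySem.Dict String Int × PySem.Dict String Int :=
  if p.1 = "north_node" then st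
  else
    match (PySem.Dict.ofList p.2).get? "sign" with
    | none => st
    | some sign =>
      if sign = "" then st
      else (st.1.modify (elementMapA.getD sign "air") 0 (· + 1),
            st.2.modify (modalityMapA.getD sign "mutable") 0 (· + 1))

def calculate_elements_modalities (planets : List (String × List (String × String))) : List (String × List (String × Int)) :=
  let init : PySem.Dict String Int × PySem.Dict String Int :=
    (PySem.Dict.ofList [("fire",0), ("earth",0), ("air",0), ("water",0)],
     PySem.Dict.ofList [("cardinal",0), ("fixed",0), ("mutable",0)])
  let st := planets.foldl stepA init
  [("elements", st.1.items), ("modalities", st.2.items)]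

-- ===== PORT B =====
-- the fixed per-bucket sign sets of Source B
def fireB : PySem.Set String := PySem.Set.ofList ["Aries", "Leo", "Sagittarius"]
def earthB : PySem.Set String := PySem.Set.ofList ["Taurus", "Virgo", "Capricorn"]
def waterB : PySem.Set String := PySem.Set.ofList ["Cancer", "Scorpio", "Pisces"]
def cardinalB : PySem.Set String := PySem.Set.ofList ["Aries", "Cancer", "Libra", "Capricorn"]
def fixedB : PySem.Set String := PySem.Set.ofList ["Taurus", "Leo", "Scorpio", "Aquarius"]

-- the comprehension's filter+element: the sign contributed by one entry, none where skipped
def signB? (p : String × List (String × String)) : Option String :=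
  if p.1 = "north_node" then none
  else
    match (PySem.Dict.ofList p.2).get? "sign" with
    | none => none
    | some sign => if sign = "" then none else some sign

def calculate_elements_modalities_alt (planets : List (String × List (String × String))) : List (String × List (String × Int)) :=
  let signs := planets.filterMap signB?
  [("elements",
    [("fire", (signs.countP (fun s => fireB.contains s) : Int)),
     ("earth", (signs.countP (fun s => earthB.contains s) : Int)),
     ("air", (signs.countP (fun s => !fireB.contains s && !earthB.contains s && !waterB.contains s) : Int)),
     ("water", (signs.countP (fun s => waterB.contains s) : Int))]),
   ("modalities",
    [("cardinal", (signs.countP (fun s => cardinalB.contains s) : Int)),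
     ("fixed", (signs.countP (fun s => fixedB.contains s) : Int)),
     ("mutable", (signs.countP (fun s => !cardinalB.contains s && !fixedB.contains s) : Int))])]

-- ===== PRECONDITION & SPEC =====
def Spec_calculate_elements_modalities (planets : List (String × List (String × String))) (out : List (String × List (String × Int))) : Prop := out = calculate_elements_modalities_alt planets
instance (planets : List (String × List (String × String))) (out : List (String × List (String × Int))) : Decidable (Spec_calculate_elements_modalities planets out) := by unfold Spec_calculate_elements_modalities; infer_instance

-- ===== CLAIM (what is proved, stated in full; the proofs are below) =====
def Claim_equal_calculate_elements_modalities : Prop := ∀ (planets : List (String × List (String × String))), Dom_calculate_elements_modalities planets → Spec_calculate_elements_modalities planets (calculate_elements_modalities planets)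

-- ===== LEMMAS AND PROOFS =====

def pvBumpPair (st : PySem.Dict String Int × PySem.Dict String Int) (s : String) :
    PySem.Dict String Int × PySem.Dict String Int :=
  (st.1.modify (elementMapA.getD s "air") 0 (· + 1),
   st.2.modify (modalityMapA.getD s "mutable") 0 (· + 1))

theorem stepA_eq (st : PySem.Dict String Int × PySem.Dict String Int)
    (p : String × List (String × String)) :
    stepA st p = match signB? p with | none => st | some s => pvBumpPair st s := by
  unfold stepA signB? pvBumpPair
  by_cases h : p.1 = "north_node"
  · simp [h]
  · simp only [h, if_false]
    cases (PySem.Dict.ofList p.2).get? "sign" with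
    | none => rfl
    | some s => by_cases hs : s = "" <;> simp [hs]

theorem foldA_eq (planets : List (String × List (String × String)))
    (st : PySem.Dict String Int × PySem.Dict String Int) :
    planets.foldl stepA st = (planets.filterMap signB?).foldl pvBumpPair st := by
  induction planets generalizing st with
  | nil => rfl
  | cons p rest ih =>
    simp only [List.foldl_cons, List.filterMap_cons, stepA_eq]
    cases signB? p <;> simp [ih]

-- A's paired loop is two independent tallies
theorem bumpPair_split (l : List String) (a b : PySem.Dict String Int) :
    l.foldl pvBumpPair (a, b) =
      (l.foldl (fun d s => d.modify (elementMapA.getD s "air") 0 (· + 1)) a,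
       l.foldl (fun d s => d.modify (modalityMapA.getD s "mutable") 0 (· + 1)) b) := by
  show l.foldl (fun st s => (st.1.modify (elementMapA.getD s "air") 0 (· + 1),
      st.2.modify (modalityMapA.getD s "mutable") 0 (· + 1))) (a, b) = _
  exact PySem.List.foldl_prod_mk
    (f := fun d s => PySem.Dict.modify d (elementMapA.getD s "air") 0 (· + 1))
    (g := fun d s => PySem.Dict.modify d (modalityMapA.getD s "mutable") 0 (· + 1)) l a b

-- closed form of A's element-table lookup
theorem gE_eq (s : String) : elementMapA.getD s "air" =
    if s = "Aries" ∨ s = "Leo" ∨ s = "Sagittarius" then "fire"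
    else if s = "Taurus" ∨ s = "Virgo" ∨ s = "Capricorn" then "earth"
    else if s = "Cancer" ∨ s = "Scorpio" ∨ s = "Pisces" then "water"
    else "air" := by
  by_cases h1 : s = "Aries"; · subst h1; decide
  by_cases h2 : s = "Taurus"; · subst h2; decide
  by_cases h3 : s = "Gemini"; · subst h3; decide
  by_cases h4 : s = "Cancer"; · subst h4; decide
  by_cases h5 : s = "Leo"; · subst h5; decide
  by_cases h6 : s = "Virgo"; · subst h6; decide
  by_cases h7 : s = "Libra"; · subst h7; decide
  by_cases h8 : s = "Scorpio"; · subst h8; decide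
  by_cases h9 : s = "Sagittarius"; · subst h9; decide
  by_cases h10 : s = "Capricorn"; · subst h10; decide
  by_cases h11 : s = "Aquarius"; · subst h11; decide
  by_cases h12 : s = "Pisces"; · subst h12; decide
  have hc : elementMapA.contains s = false := by
    rw [PySem.Dict.contains_eq_decide_mem_keys]
    have hk : elementMapA.keys = ["Aries","Taurus","Gemini","Cancer","Leo","Virgo","Libra","Scorpio","Sagittarius","Capricorn","Aquarius","Pisces"] := by decide
    simp [hk, h1, h2, h3, h4, h5, h6, h7, h8, h9, h10, h11, h12]
  rw [PySem.Dict.getD_of_not_contains elementMapA "air" hc]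
  simp [h1, h2, h4, h5, h6, h8, h9, h10, h12]

-- closed form of A's modality-table lookup
theorem gM_eq (s : String) : modalityMapA.getD s "mutable" =
    if s = "Aries" ∨ s = "Cancer" ∨ s = "Libra" ∨ s = "Capricorn" then "cardinal"
    else if s = "Taurus" ∨ s = "Leo" ∨ s = "Scorpio" ∨ s = "Aquarius" then "fixed"
    else "mutable" := by
  by_cases h1 : s = "Aries"; · subst h1; decide
  by_cases h2 : s = "Taurus"; · subst h2; decide
  by_cases h3 : s = "Gemini"; · subst h3; decide
  by_cases h4 : s = "Cancer"; · subst h4; decide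
  by_cases h5 : s = "Leo"; · subst h5; decide
  by_cases h6 : s = "Virgo"; · subst h6; decide
  by_cases h7 : s = "Libra"; · subst h7; decide
  by_cases h8 : s = "Scorpio"; · subst h8; decide
  by_cases h9 : s = "Sagittarius"; · subst h9; decide
  by_cases h10 : s = "Capricorn"; · subst h10; decide
  by_cases h11 : s = "Aquarius"; · subst h11; decide
  by_cases h12 : s = "Pisces"; · subst h12; decide
  have hc : modalityMapA.contains s = false := by
    rw [PySem.Dict.contains_eq_decide_mem_keys]
    have hk : modalityMapA.keys = ["Aries","Taurus","Gemini","Cancer","Leo","Virgo","Libra","Scorpio","Sagittarius","Capricorn","Aquarius","Pisces"] := by decide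
    simp [hk, h1, h2, h3, h4, h5, h6, h7, h8, h9, h10, h11, h12]
  rw [PySem.Dict.getD_of_not_contains modalityMapA "mutable" hc]
  simp [h1, h2, h4, h5, h7, h8, h10, h11]

-- values of the element table stay inside the four element keys
theorem em_mem (s : String) :
    elementMapA.getD s "air" ∈ (["fire", "earth", "air", "water"] : List String) := by
  rw [gE_eq]; split_ifs <;> decide

-- values of the modality table stay inside the three modality keys
theorem mm_mem (s : String) :
    modalityMapA.getD s "mutable" ∈ (["cardinal", "fixed", "mutable"] : List String) := by
  rw [gM_eq]; split_ifs <;> decide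

theorem set_update_of_subset (s xs : List String) (h : ∀ x ∈ xs, x ∈ s) :
    PySem.Set.update s xs = s := by
  rw [PySem.Set.update_eq_append_filter]
  have hnil : (PySem.Set.ofList xs).filter (fun y => !(PySem.Set.contains s y)) = [] := by
    refine List.filter_eq_nil_iff.mpr (fun y hy => ?_)
    have hmem : y ∈ s := h y ((PySem.Set.mem_ofList xs y).mp hy)
    simpa using hmem
  rw [hnil, List.append_nil]

-- A's direct `+= 1` loop, read off at one key
theorem getD_foldl_modify_one (g : String → String) (l : List String)
    (d : PySem.Dict String Int) (c : String) :
    (l.foldl (fun d s => d.modify (g s) 0 (· + 1)) d).getD c 0 =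
      d.getD c 0 + ((l.map g).count c : Int) := by
  induction l generalizing d with
  | nil => simp
  | cons s l ih =>
    simp only [List.foldl_cons, List.map_cons, List.count_cons, ih]
    by_cases h : g s = c
    · simp [h]; ring
    · simp [h, Ne.symm h, PySem.Dict.getD_modify]

-- A's tally result, as an explicit items list of per-key image counts
theorem items_tally (g : String → String) (init : PySem.Dict String Int)
    (ks : List String) (hk : init.keys = ks) (hnd : ks.Nodup) (hz : ∀ c ∈ ks, init.getD c 0 = 0)
    (hg : ∀ s, g s ∈ ks) (l : List String) :
    (l.foldl (fun d s => d.modify (g s) 0 (· + 1)) init).items =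
      ks.map (fun c => (c, ((l.map g).count c : Int))) := by
  have hkeys : (l.foldl (fun d s => d.modify (g s) 0 (· + 1)) init).keys = ks := by
    rw [PySem.Dict.keys_foldl_modify_key (key := g) (f := fun _ _ => (· + 1)), hk,
      set_update_of_subset]
    intro x hx
    rcases List.mem_map.mp hx with ⟨s, _, rfl⟩
    exact hg s
  rw [PySem.Dict.items_eq_map_keys _ (hkeys ▸ hnd) 0, hkeys]
  apply List.map_congr_left
  intro c hc
  rw [getD_foldl_modify_one, hz c hc, zero_add]

-- the image count equals a membership count of the source list
theorem count_map_eq_countP (g : String → String) (l : List String) (c : String)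
    (q : String → Bool) (hq : ∀ s, (g s == c) = q s) :
    ((l.map g).count c : Int) = (l.countP q : Int) := by
  rw [List.count_eq_countP, List.countP_map]
  congr 1
  exact List.countP_congr (fun s _ => by rw [Function.comp_apply, hq s])

-- the seven bucket predicates, pointwise
theorem pw_fire (s : String) : (elementMapA.getD s "air" == "fire") = fireB.contains s := by
  have hf : fireB = ["Aries", "Leo", "Sagittarius"] := by decide
  rw [gE_eq, hf]
  split_ifs with h1 h2 h3
  · rcases h1 with rfl|rfl|rfl <;> decide
  · rcases h2 with rfl|rfl|rfl <;> decide
  · rcases h3 with rfl|rfl|rfl <;> decide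
  · push Not at h1; simp [List.contains_eq_mem, h1]

theorem pw_earth (s : String) : (elementMapA.getD s "air" == "earth") = earthB.contains s := by
  have he : earthB = ["Taurus", "Virgo", "Capricorn"] := by decide
  rw [gE_eq, he]
  split_ifs with h1 h2 h3
  · rcases h1 with rfl|rfl|rfl <;> decide
  · rcases h2 with rfl|rfl|rfl <;> decide
  · rcases h3 with rfl|rfl|rfl <;> decide
  · push Not at h2; simp [List.contains_eq_mem, h2]

theorem pw_water (s : String) : (elementMapA.getD s "air" == "water") = waterB.contains s := by
  have hw : waterB = ["Cancer", "Scorpio", "Pisces"] := by decide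
  rw [gE_eq, hw]
  split_ifs with h1 h2 h3
  · rcases h1 with rfl|rfl|rfl <;> decide
  · rcases h2 with rfl|rfl|rfl <;> decide
  · rcases h3 with rfl|rfl|rfl <;> decide
  · push Not at h3; simp [List.contains_eq_mem, h3]

theorem pw_air (s : String) : (elementMapA.getD s "air" == "air") =
    (!fireB.contains s && !earthB.contains s && !waterB.contains s) := by
  have hf : fireB = ["Aries", "Leo", "Sagittarius"] := by decide
  have he : earthB = ["Taurus", "Virgo", "Capricorn"] := by decide
  have hw : waterB = ["Cancer", "Scorpio", "Pisces"] := by decide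
  rw [gE_eq, hf, he, hw]
  split_ifs with h1 h2 h3
  · rcases h1 with rfl|rfl|rfl <;> decide
  · rcases h2 with rfl|rfl|rfl <;> decide
  · rcases h3 with rfl|rfl|rfl <;> decide
  · push Not at h1 h2 h3
    simp [List.contains_eq_mem, h1, h2, h3]

theorem pw_cardinal (s : String) : (modalityMapA.getD s "mutable" == "cardinal") = cardinalB.contains s := by
  have hc : cardinalB = ["Aries", "Cancer", "Libra", "Capricorn"] := by decide
  rw [gM_eq, hc]
  split_ifs with h1 h2
  · rcases h1 with rfl|rfl|rfl|rfl <;> decide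
  · rcases h2 with rfl|rfl|rfl|rfl <;> decide
  · push Not at h1; simp [List.contains_eq_mem, h1]

theorem pw_fixed (s : String) : (modalityMapA.getD s "mutable" == "fixed") = fixedB.contains s := by
  have hx : fixedB = ["Taurus", "Leo", "Scorpio", "Aquarius"] := by decide
  rw [gM_eq, hx]
  split_ifs with h1 h2
  · rcases h1 with rfl|rfl|rfl|rfl <;> decide
  · rcases h2 with rfl|rfl|rfl|rfl <;> decide
  · push Not at h2; simp [List.contains_eq_mem, h2]

theorem pw_mutable (s : String) : (modalityMapA.getD s "mutable" == "mutable") =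
    (!cardinalB.contains s && !fixedB.contains s) := by
  have hc : cardinalB = ["Aries", "Cancer", "Libra", "Capricorn"] := by decide
  have hx : fixedB = ["Taurus", "Leo", "Scorpio", "Aquarius"] := by decide
  rw [gM_eq, hc, hx]
  split_ifs with h1 h2
  · rcases h1 with rfl|rfl|rfl|rfl <;> decide
  · rcases h2 with rfl|rfl|rfl|rfl <;> decide
  · push Not at h1 h2
    simp [List.contains_eq_mem, h1, h2]

-- ===== VERDICT (by name: the statement is the Claim_ definition above) =====
theorem calculate_elements_modalities_spec : Claim_equal_calculate_elements_modalities := by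
  intro planets _
  unfold Spec_calculate_elements_modalities
  simp only [calculate_elements_modalities, calculate_elements_modalities_alt]
  rw [foldA_eq, bumpPair_split,
    items_tally _ _ ["fire", "earth", "air", "water"] (by decide) (by decide) (by decide) em_mem,
    items_tally _ _ ["cardinal", "fixed", "mutable"] (by decide) (by decide) (by decide) mm_mem]
  simp only [List.map_cons, List.map_nil]
  rw [count_map_eq_countP _ _ _ _ pw_fire, count_map_eq_countP _ _ _ _ pw_earth,
      count_map_eq_countP _ _ _ _ pw_air, count_map_eq_countP _ _ _ _ pw_water,
      count_map_eq_countP _ _ _ _ pw_cardinal, count_map_eq_countP _ _ _ _ pw_fixed,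
      count_map_eq_countP _ _ _ _ pw_mutable]
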